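-- pv_equiv track=rewrite | github.com/fanxing-6/pdf2zh-skill | scripts/pdf2zh_skill/latex_ops.py | brace_balance
-- ===== SOURCE A (Python) =====
-- def brace_balance(text: str) -> int:
--     balance = 0
--     i = 0
--     while i < len(text):
--         if text[i] == "\\":
--             i += 2
--             continue
--         if text[i] == "{":
--             balance += 1
--         elif text[i] == "}":
--             balance -= 1
--         i += 1
--     return balance
-- ===== SOURCE B (Python) =====
-- import re
--
-- def brace_balance(text: str) -> int:
--     cleaned = re.sub(r'\\.', '', text, flags=re.DOTALL)
--     return cleaned.count('{') - cleaned.count('}')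
-- ===== Notes on version B (the rewrite author's own statement) =====
-- stated objective: simpler
-- what changed: Replaces the index-stepping scan that tracks a running balance by a regex pass that deletes every escaped pair, followed by two independent brace counts.
import Mathlib
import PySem

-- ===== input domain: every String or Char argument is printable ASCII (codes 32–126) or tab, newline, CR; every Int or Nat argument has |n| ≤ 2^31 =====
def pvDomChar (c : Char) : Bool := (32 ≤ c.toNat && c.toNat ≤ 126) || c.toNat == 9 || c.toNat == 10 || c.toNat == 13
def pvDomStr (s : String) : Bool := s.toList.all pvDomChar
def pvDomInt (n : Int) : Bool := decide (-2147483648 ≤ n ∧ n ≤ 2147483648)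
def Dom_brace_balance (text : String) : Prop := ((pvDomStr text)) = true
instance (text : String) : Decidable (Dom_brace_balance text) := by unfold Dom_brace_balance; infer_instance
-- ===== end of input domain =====

-- B replaces the one-pass balance-tracking scan by deleting escaped pairs, then counting each brace separately (simpler).

-- ===== PORT A =====
-- A's while loop over indices, as structural recursion over the character list:
-- a backslash consumes two characters (i += 2), otherwise the head adjusts the balance.
def braceBalanceLoop : List Char → Int → Int
  | [], bal => bal
  | '\\' :: rest, bal =>
      match rest with
      | [] => bal                      -- i += 2 past the end: loop exits
      | _ :: rest' => braceBalanceLoop rest' bal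
  | c :: rest, bal =>
      if c = '{' then braceBalanceLoop rest (bal + 1)
      else if c = '}' then braceBalanceLoop rest (bal - 1)
      else braceBalanceLoop rest bal

def brace_balance (text : String) : Int :=
  braceBalanceLoop text.toList 0

-- ===== PORT B =====
-- re.sub(r'\\.', '', text, flags=re.DOTALL): delete each backslash together with the
-- following character, left to right, non-overlapping (exact for this pattern).
def removeEscaped : List Char → List Char
  | [] => []
  | '\\' :: rest =>
      match rest with
      | [] => ['\\']                   -- a lone trailing backslash is not matched
      | _ :: rest' => removeEscaped rest'
  | c :: rest => c :: removeEscaped rest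

-- cleaned.count('{') with a single-character needle is exactly List.count (hand-ported, exact).
def brace_balance_alt (text : String) : Int :=
  let cleaned := removeEscaped text.toList
  (cleaned.count '{' : Int) - (cleaned.count '}' : Int)

-- ===== PRECONDITION & SPEC =====
def Spec_brace_balance (text : String) (out : Int) : Prop := out = brace_balance_alt text
instance (text : String) (out : Int) : Decidable (Spec_brace_balance text out) := by unfold Spec_brace_balance; infer_instance

-- ===== CLAIM (what is proved, stated in full; the proofs are below) =====
def Claim_equal_brace_balance : Prop := ∀ (text : String), Dom_brace_balance text → Spec_brace_balance text (brace_balance text)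

-- ===== LEMMAS AND PROOFS =====

theorem loop_eq (cs : List Char) (bal : Int) :
    braceBalanceLoop cs bal =
      bal + ((removeEscaped cs).count '{' : Int) - ((removeEscaped cs).count '}' : Int) := by
  induction cs using removeEscaped.induct generalizing bal with
  | case1 => simp [braceBalanceLoop, removeEscaped]
  | case2 => simp [braceBalanceLoop, removeEscaped, List.count_cons]
  | case3 _ rest' ih =>
      simpa [braceBalanceLoop, removeEscaped] using ih bal
  | case4 c rest hne ih =>
      by_cases h1 : c = '{'
      · simp [braceBalanceLoop, removeEscaped, h1, hne, List.count_cons, ih]; omega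
      · by_cases h2 : c = '}'
        · simp [braceBalanceLoop, removeEscaped, h1, h2, hne, List.count_cons, ih]; omega
        · simp [braceBalanceLoop, removeEscaped, h1, h2, hne, List.count_cons, ih]

-- ===== VERDICT (by name: the statement is the Claim_ definition above) =====
theorem brace_balance_spec : Claim_equal_brace_balance := by
  intro text _
  unfold Spec_brace_balance brace_balance brace_balance_alt
  simp [loop_eq]
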